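-- pv_equiv track=rewrite | github.com/0klap/OPG | Python/Doma/newTimeTesting.py | BubbleSortSteps
-- ===== SOURCE A (Python) =====
-- def BubbleSortSteps(pole):
--     porovnania = 0
--     presuny  = 0
--     while True:
--         y = 0
--         for a in range(len(pole) - 1):
--             porovnania += 1
--             if pole[a] > pole[a+1]:
--                 pole[a], pole[a+1] = pole[a+1], pole[a]
--                 presuny += 2
--                 y += 1
--         if y == 0:
--             return porovnania, presuny
-- ===== SOURCE B (Python) =====
-- # Closed-form reimplementation: bubble sort runs 1 + max leftward displacement
-- # passes of (n-1) comparisons each, and every swap removes exactly one inversion,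
-- # so presuny = 2 * (number of inversions).  (pole is sorted in place, like A.)
-- def BubbleSortSteps(pole):
--     n = len(pole)
--     inv = 0
--     passes = 1
--     for j in range(n):
--         d = sum(1 for z in pole[:j] if z > pole[j])
--         inv += d
--         if d + 1 > passes:
--             passes = d + 1
--     pole.sort()
--     return (max(n - 1, 0) * passes, 2 * inv)
-- ===== Notes on version B (the rewrite author's own statement) =====
-- stated objective: faster
-- what changed: Replaces A's repeated bubble passes (loop until no swap, counting comparisons and swaps as they happen) by a single triangular scan computing the closed form: comparisons = (n-1)*(1 + max leftward displacement), swaps = 2*inversions.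
import Mathlib
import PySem

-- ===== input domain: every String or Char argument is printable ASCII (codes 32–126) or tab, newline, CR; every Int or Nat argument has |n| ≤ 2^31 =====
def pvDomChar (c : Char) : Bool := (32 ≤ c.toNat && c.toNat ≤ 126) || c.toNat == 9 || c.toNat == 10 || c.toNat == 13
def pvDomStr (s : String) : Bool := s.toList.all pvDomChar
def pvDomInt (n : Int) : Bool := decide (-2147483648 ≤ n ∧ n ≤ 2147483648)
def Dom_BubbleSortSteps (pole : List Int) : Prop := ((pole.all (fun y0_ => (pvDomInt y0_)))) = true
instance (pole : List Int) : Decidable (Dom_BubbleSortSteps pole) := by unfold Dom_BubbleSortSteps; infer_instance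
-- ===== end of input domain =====

-- B replaces A's repeated-pass simulation by a closed-form count (passes = 1 + max
-- leftward displacement, swaps = 2 * inversions); equivalence is about the RETURN value
-- only — both Pythons also sort `pole` in place (A by bubbling, B by pole.sort()).

-- ===== PORT A =====
-- Inversion count: the termination measure of A's while-loop (each swap removes one inversion).
def pvInv : List Int → Nat
  | [] => 0
  | x :: t => t.countP (fun z => decide (z < x)) + pvInv t

-- One inner for-loop of A over the same state: carry = pole[a]; returns
-- (list after the pass, comparisons made, number of swaps y).
def pvGo : Int → List Int → List Int × Nat × Nat
  | m, [] => ([m], 0, 0)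
  | m, x :: t =>
    if m > x then
      let r := pvGo m t
      (x :: r.1, r.2.1 + 1, r.2.2 + 1)
    else
      let r := pvGo x t
      (m :: r.1, r.2.1 + 1, r.2.2)

def pvPass : List Int → List Int × Nat × Nat
  | [] => ([], 0, 0)
  | x :: t => pvGo x t

-- Termination lemmas for A's while-loop (cited by pvLoop's decreasing_by).
lemma pvGo_perm (m : Int) (t : List Int) : (pvGo m t).1.Perm (m :: t) := by
  induction t generalizing m with
  | nil => simp [pvGo]
  | cons x t ih =>
    by_cases h : m > x
    · simpa [pvGo, h] using ((ih m).cons x).trans (List.Perm.swap m x t)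
    · simpa [pvGo, h] using (ih x).cons m

lemma pvGo_inv (m : Int) (t : List Int) :
    pvInv (pvGo m t).1 + (pvGo m t).2.2 = pvInv (m :: t) := by
  induction t generalizing m with
  | nil => simp [pvGo, pvInv]
  | cons x t ih =>
    by_cases h : m > x
    · have hc : (pvGo m t).1.countP (fun z => decide (z < x))
          = (m :: t).countP (fun z => decide (z < x)) := (pvGo_perm m t).countP_eq _
      have hmx : ¬ (m < x) := by omega
      have hxm : x < m := h
      have := ih m
      simp only [pvGo, if_pos h, pvInv, List.countP_cons, hc] at *
      simp [hmx, hxm] at *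
      omega
    · have hxm : ¬ (x < m) := by omega
      have hc : (pvGo x t).1.countP (fun z => decide (z < m))
          = (x :: t).countP (fun z => decide (z < m)) := (pvGo_perm x t).countP_eq _
      have := ih x
      simp only [pvGo, if_neg h, pvInv, List.countP_cons, hc] at *
      simp [hxm] at *
      omega

lemma pvPass_inv_lt (l : List Int) (h : ¬ (pvPass l).2.2 = 0) :
    pvInv (pvPass l).1 < pvInv l := by
  cases l with
  | nil => simp [pvPass] at h
  | cons x t =>
    have := pvGo_inv x t
    simp only [pvPass] at *
    omega

-- A's while-loop: one pass, add comparisons and 2*swaps, stop when y == 0.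
def pvLoop (l : List Int) (por pres : Int) : List Int :=
  let r := pvPass l
  if h : r.2.2 = 0 then [por + (r.2.1 : Int), pres + 2 * (r.2.2 : Int)]
  else pvLoop r.1 (por + (r.2.1 : Int)) (pres + 2 * (r.2.2 : Int))
termination_by pvInv l
decreasing_by exact pvPass_inv_lt l h

def BubbleSortSteps (pole : List Int) : List Int := pvLoop pole 0 0

-- ===== PORT B =====
-- d = number of elements of the prefix pole[:j] greater than pole[j].
def pvDisp (pre : List Int) (x : Int) : Nat := pre.countP (fun z => decide (x < z))

-- B's single triangular scan: inv += d; passes = max(passes, d + 1).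
def pvScan : List Int → List Int → Nat → Nat → Nat × Nat
  | _, [], inv, passes => (inv, passes)
  | pre, x :: t, inv, passes =>
    let d := pvDisp pre x
    pvScan (pre ++ [x]) t (inv + d) (if passes < d + 1 then d + 1 else passes)

def BubbleSortSteps_alt (pole : List Int) : List Int :=
  let r := pvScan [] pole 0 1
  [max ((pole.length : Int) - 1) 0 * (r.2 : Int), 2 * (r.1 : Int)]

-- ===== PRECONDITION & SPEC =====
def Spec_BubbleSortSteps (pole : List Int) (out : List Int) : Prop := out = BubbleSortSteps_alt pole
instance (pole : List Int) (out : List Int) : Decidable (Spec_BubbleSortSteps pole out) := by unfold Spec_BubbleSortSteps; infer_instance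

-- ===== CLAIM (what is proved, stated in full; the proofs are below) =====
def Claim_equal_BubbleSortSteps : Prop := ∀ (pole : List Int), Dom_BubbleSortSteps pole → Spec_BubbleSortSteps pole (BubbleSortSteps pole)

-- ===== LEMMAS AND PROOFS =====

-- Closed form of the list produced by one pass: running max as carry, emit the smaller.
def pvOut : Int → List Int → List Int
  | m, [] => [m]
  | m, y :: t => min m y :: pvOut (max m y) t

-- Sum of the displacements d over the suffix (the inv accumulator of pvScan).
def pvI : List Int → List Int → Nat
  | _, [] => 0
  | pre, x :: t => pvDisp pre x + pvI (pre ++ [x]) t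

-- Max of d+1 over the suffix (the passes accumulator of pvScan, seeded with max).
def pvQ : List Int → List Int → Nat
  | _, [] => 0
  | pre, x :: t => max (pvDisp pre x + 1) (pvQ (pre ++ [x]) t)

lemma pvGo_fst (m : Int) (t : List Int) : (pvGo m t).1 = pvOut m t := by
  induction t generalizing m with
  | nil => simp [pvGo, pvOut]
  | cons x t ih =>
    by_cases h : m > x
    · simp [pvGo, pvOut, h, min_eq_right (le_of_lt h), max_eq_left (le_of_lt h), ih]
    · have h' : m ≤ x := by omega
      simp [pvGo, pvOut, h, min_eq_left h', max_eq_right h', ih]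

lemma pvGo_comps (m : Int) (t : List Int) : (pvGo m t).2.1 = t.length := by
  induction t generalizing m with
  | nil => simp [pvGo]
  | cons x t ih => by_cases h : m > x <;> simp [pvGo, h, ih]

lemma pvOut_length (m : Int) (t : List Int) : (pvOut m t).length = t.length + 1 := by
  induction t generalizing m with
  | nil => simp [pvOut]
  | cons x t ih => simp [pvOut, ih]

lemma pvGo_swaps_zero (m : Int) (t : List Int) :
    (pvGo m t).2.2 = 0 ↔ (m :: t).Pairwise (· ≤ ·) := by
  induction t generalizing m with
  | nil => simp [pvGo]
  | cons x t ih =>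
    by_cases h : m > x
    · have hnp : ¬ (m :: x :: t).Pairwise (· ≤ ·) := by
        intro hp
        rcases List.pairwise_cons.mp hp with ⟨h1, _⟩
        exact absurd (h1 x (by simp)) (by omega)
      simp [pvGo, h, hnp]
    · have h' : m ≤ x := by omega
      have hred : (pvGo m (x :: t)).2.2 = (pvGo x t).2.2 := by
        simp [pvGo, h]
      rw [hred, ih x]
      constructor
      · intro hp
        rcases List.pairwise_cons.mp hp with ⟨h1, h2⟩
        refine List.pairwise_cons.mpr ⟨?_, hp⟩
        intro y hy
        rcases List.mem_cons.mp hy with rfl | hy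
        · exact h'
        · exact le_trans h' (h1 y hy)
      · intro hp
        exact (List.pairwise_cons.mp hp).2

lemma pvQ_le_one (l : List Int) : ∀ pre, pvQ pre l ≤ 1 ↔
    (∀ x ∈ l, ∀ z ∈ pre, z ≤ x) ∧ l.Pairwise (· ≤ ·) := by
  induction l with
  | nil => simp [pvQ]
  | cons x t ih =>
    intro pre
    have hd : pvDisp pre x = 0 ↔ ∀ z ∈ pre, z ≤ x := by
      simp only [pvDisp, List.countP_eq_zero, decide_eq_true_eq]
      constructor
      · intro h z hz; exact not_lt.mp (h z hz)
      · intro h z hz; exact not_lt.mpr (h z hz)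
    have hsplit : pvQ pre (x :: t) ≤ 1 ↔ pvDisp pre x = 0 ∧ pvQ (pre ++ [x]) t ≤ 1 := by
      simp only [pvQ, max_le_iff]
      omega
    rw [hsplit, hd, ih, List.pairwise_cons]
    constructor
    · rintro ⟨hpx, hall, hp⟩
      refine ⟨?_, ?_, hp⟩
      · intro y hy z hz
        rcases List.mem_cons.mp hy with rfl | hy
        · exact hpx z hz
        · exact hall y hy z (List.mem_append.mpr (Or.inl hz))
      · intro y hy
        exact hall y hy x (List.mem_append.mpr (Or.inr (by simp)))
    · rintro ⟨hall, hxt, hp⟩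
      refine ⟨fun z hz => hall x (by simp) z hz, ?_, hp⟩
      intro y hy z hz
      rcases List.mem_append.mp hz with hz | hz
      · exact hall y (by simp [hy]) z hz
      · have hzx : z = x := by simpa using hz
        subst hzx
        exact hxt y hy

lemma pvInv_eq_zero (l : List Int) (h : l.Pairwise (· ≤ ·)) : pvInv l = 0 := by
  induction l with
  | nil => simp [pvInv]
  | cons x t ih =>
    rcases List.pairwise_cons.mp h with ⟨h1, h2⟩
    have : t.countP (fun z => decide (z < x)) = 0 := by
      rw [List.countP_eq_zero]
      intro z hz
      simpa using not_lt.mpr (h1 z hz)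
    simp [pvInv, this, ih h2]

-- The carry invariant: the pass output's prefix counts one fewer "greater" element
-- than the original prefix whenever the carry (= prefix max) exceeds the probe.
lemma pvQ_out (t : List Int) : ∀ (pre1 pre2 : List Int) (c : Int),
    (∀ v : Int, pre2.countP (fun z => decide (v < z))
        = pre1.countP (fun z => decide (v < z)) + (if v < c then 1 else 0)) →
    (∀ z ∈ pre1, z ≤ c) →
    pvQ pre1 (pvOut c t) = max 1 (pvQ pre2 t - 1) := by
  induction t with
  | nil =>
    intro pre1 pre2 c h1 h2
    have : pvDisp pre1 c = 0 := by
      rw [pvDisp, List.countP_eq_zero]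
      intro z hz
      simpa using not_lt.mpr (h2 z hz)
    simp [pvOut, pvQ, this]
  | cons y t ih =>
    intro pre1 pre2 c h1 h2
    have hmm : min c y = c ∧ max c y = y ∨ min c y = y ∧ max c y = c := by
      rcases le_total c y with h | h
      · exact Or.inl ⟨min_eq_left h, max_eq_right h⟩
      · exact Or.inr ⟨min_eq_right h, max_eq_left h⟩
    have h1' : ∀ v : Int, (pre2 ++ [y]).countP (fun z => decide (v < z))
        = (pre1 ++ [min c y]).countP (fun z => decide (v < z))
          + (if v < max c y then 1 else 0) := by
      intro v
      have := h1 v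
      simp only [List.countP_append, List.countP_singleton]
      rcases hmm with ⟨hmin, hmax⟩ | ⟨hmin, hmax⟩ <;> rw [hmin, hmax] <;>
        split_ifs <;> simp_all
    have h2' : ∀ z ∈ pre1 ++ [min c y], z ≤ max c y := by
      intro z hz
      rcases List.mem_append.mp hz with hz | hz
      · exact le_trans (h2 z hz) (le_max_left c y)
      · simp only [List.mem_singleton] at hz
        subst hz
        exact le_trans (min_le_left c y) (le_max_left c y)
    have hrec := ih (pre1 ++ [min c y]) (pre2 ++ [y]) (max c y) h1' h2'
    -- relate the two head displacements
    by_cases hyc : y < c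
    · have hds : pvDisp pre1 (min c y) + 1 = pvDisp pre2 y := by
        have h' := h1 y
        rw [if_pos hyc] at h'
        rw [min_eq_right (le_of_lt hyc)]
        simp only [pvDisp]
        omega
      simp only [pvOut, pvQ, hrec]
      omega
    · have hcy : c ≤ y := not_lt.mp hyc
      have h0 : pvDisp pre1 (min c y) = 0 := by
        rw [min_eq_left hcy, pvDisp, List.countP_eq_zero]
        intro z hz
        simpa using not_lt.mpr (h2 z hz)
      have h0' : pvDisp pre2 y = 0 := by
        have := h1 y
        have hc1 : pre1.countP (fun z => decide (y < z)) = 0 := by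
          rw [List.countP_eq_zero]
          intro w hw
          simpa using not_lt.mpr (le_trans (h2 w hw) hcy)
        simp only [pvDisp, hc1, if_neg hyc, add_zero] at *
        omega
      simp only [pvOut, pvQ, hrec]
      omega

lemma pvScan_spec (rest : List Int) : ∀ (pre : List Int) (inv p : Nat),
    pvScan pre rest inv p = (inv + pvI pre rest, max p (pvQ pre rest)) := by
  induction rest with
  | nil => intro pre inv p; simp [pvScan, pvI, pvQ]
  | cons x t ih =>
    intro pre inv p
    rw [pvScan, ih]
    have : (if p < pvDisp pre x + 1 then pvDisp pre x + 1 else p)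
        = max p (pvDisp pre x + 1) := by split_ifs <;> omega
    simp only [pvI, pvQ, this, Prod.mk.injEq]
    refine ⟨by omega, ?_⟩
    rw [max_assoc]

lemma pvDisp_append_sum (t : List Int) : ∀ (pre : List Int) (x : Int),
    (t.map (pvDisp (pre ++ [x]))).sum
      = (t.map (pvDisp pre)).sum + t.countP (fun z => decide (z < x)) := by
  induction t with
  | nil => simp
  | cons y t ih =>
    intro pre x
    have h1 : pvDisp (pre ++ [x]) y = pvDisp pre y + (if y < x then 1 else 0) := by
      by_cases h : y < x <;> simp [pvDisp, List.countP_append, h]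
    have h2 : List.countP (fun z => decide (z < x)) (y :: t)
        = (if y < x then 1 else 0) + List.countP (fun z => decide (z < x)) t := by
      rw [List.countP_cons]
      by_cases h : y < x <;> simp [h, Nat.add_comm]
    simp only [List.map_cons, List.sum_cons]
    rw [h1, h2, ih]
    omega

lemma pvI_sum (rest : List Int) : ∀ pre, pvI pre rest = pvInv rest + (rest.map (pvDisp pre)).sum := by
  induction rest with
  | nil => simp [pvI, pvInv]
  | cons x t ih =>
    intro pre
    simp only [pvI, pvInv, ih (pre ++ [x]), pvDisp_append_sum, List.map_cons, List.sum_cons]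
    omega

lemma pvI_nil_eq_inv (l : List Int) : pvI [] l = pvInv l := by
  have h : ∀ l' : List Int, (l'.map (pvDisp [])).sum = 0 := by
    intro l'
    induction l' with
    | nil => simp
    | cons a t ih => simp [pvDisp, ih]
  simp [pvI_sum, h]

-- A's loop computes the closed form: (1 + max displacement) * (n-1) comparisons, 2*inv swaps.
lemma pvLoop_spec (k : Nat) : ∀ (l : List Int) (por pres : Int), pvQ [] l ≤ k →
    pvLoop l por pres
      = [por + ((max 1 (pvQ [] l) * (l.length - 1) : Nat) : Int),
         pres + 2 * (pvInv l : Int)] := by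
  induction k with
  | zero =>
    intro l por pres hk
    cases l with
    | nil => rw [pvLoop]; simp [pvPass, pvQ, pvInv]
    | cons m rest =>
      exfalso
      simp only [pvQ, max_le_iff] at hk
      omega
  | succ k ih =>
    intro l por pres hk
    cases l with
    | nil => rw [pvLoop]; simp [pvPass, pvQ, pvInv]
    | cons m rest =>
      have hQ : pvQ [] (m :: rest) = max 1 (pvQ [m] rest) := by
        simp [pvQ, pvDisp, List.nil_append]
      rw [pvLoop]
      by_cases hs : (pvPass (m :: rest)).2.2 = 0
      · -- no swaps: the list is sorted, one pass of rest.length comparisons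
        have hpair : (m :: rest).Pairwise (· ≤ ·) := by
          have := pvGo_swaps_zero m rest
          simp only [pvPass] at hs
          exact this.mp hs
        have hq1 : pvQ [m] rest ≤ 1 := by
          rw [pvQ_le_one]
          rcases List.pairwise_cons.mp hpair with ⟨h1, h2⟩
          refine ⟨?_, h2⟩
          rintro y hy z hz
          simp only [List.mem_singleton] at hz
          subst hz
          exact h1 y hy
        have hinv : pvInv (m :: rest) = 0 := pvInv_eq_zero _ hpair
        have hcomp : (pvPass (m :: rest)).2.1 = rest.length := by
          simp [pvPass, pvGo_comps]
        rw [dif_pos hs]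
        rw [hQ, hs, hcomp, hinv]
        have : max 1 (max 1 (pvQ [m] rest)) = 1 := by omega
        rw [this]
        simp
      · -- swaps happened: the list was unsorted, recurse with one fewer needed pass
        have hq2 : 2 ≤ pvQ [m] rest := by
          by_contra hcon
          apply hs
          have hq1 : pvQ [m] rest ≤ 1 := by omega
          rw [pvQ_le_one] at hq1
          have hpair : (m :: rest).Pairwise (· ≤ ·) := by
            rw [List.pairwise_cons]
            refine ⟨?_, hq1.2⟩
            intro y hy
            exact hq1.1 y hy m (by simp)
          have := pvGo_swaps_zero m rest
          simp only [pvPass]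
          exact this.mpr hpair
        have hout : (pvPass (m :: rest)).1 = pvOut m rest := by
          simp [pvPass, pvGo_fst]
        have hQ' : pvQ [] (pvOut m rest) = pvQ [m] rest - 1 := by
          have h1 : ∀ v : Int, ([m] : List Int).countP (fun z => decide (v < z))
              = ([] : List Int).countP (fun z => decide (v < z)) + (if v < m then 1 else 0) := by
            intro v
            simp [List.countP_singleton]
          have := pvQ_out rest [] [m] m h1 (by simp)
          rw [this]
          omega
        have hk' : pvQ [] (pvPass (m :: rest)).1 ≤ k := by
          rw [hout, hQ']
          rw [hQ] at hk
          omega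
        rw [dif_neg hs]
        rw [ih _ _ _ hk']
        have hcomp : (pvPass (m :: rest)).2.1 = rest.length := by
          simp [pvPass, pvGo_comps]
        have hlen : (pvPass (m :: rest)).1.length = rest.length + 1 := by
          rw [hout, pvOut_length]
        have hinv : pvInv (pvPass (m :: rest)).1 + (pvPass (m :: rest)).2.2
            = pvInv (m :: rest) := by
          simp only [pvPass]
          exact pvGo_inv m rest
        rw [hout] at *
        rw [hQ', hlen, hcomp, hQ]
        have hq : pvQ [m] rest - 1 ≥ 1 := by omega
        have e1 : max 1 (pvQ [m] rest - 1) = pvQ [m] rest - 1 := by omega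
        have e2 : max 1 (max 1 (pvQ [m] rest)) = pvQ [m] rest := by omega
        rw [e1, e2]
        simp only [List.cons.injEq, and_true]
        refine ⟨?_, ?_⟩
        · simp only [Nat.add_sub_cancel, List.length_cons]
          have e : rest.length + (pvQ [m] rest - 1) * rest.length
              = pvQ [m] rest * rest.length := by
            have h4 : pvQ [m] rest - 1 + 1 = pvQ [m] rest := by omega
            generalize hq1 : pvQ [m] rest - 1 = a at h4 ⊢
            calc rest.length + a * rest.length = (a + 1) * rest.length := by ring
              _ = pvQ [m] rest * rest.length := by rw [h4]
          rw [← e]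
          push_cast
          ring
        · have : (pvInv (pvOut m rest) : Int)
              = (pvInv (m :: rest) : Int) - ((pvPass (m :: rest)).2.2 : Int) := by
            simp only [pvPass] at *
            omega
          rw [this]
          ring

lemma A_formula (pole : List Int) :
    BubbleSortSteps pole
      = [((max 1 (pvQ [] pole) * (pole.length - 1) : Nat) : Int), 2 * (pvInv pole : Int)] := by
  have := pvLoop_spec (pvQ [] pole) pole 0 0 (le_refl _)
  simpa [BubbleSortSteps] using this

lemma B_formula (pole : List Int) :
    BubbleSortSteps_alt pole
      = [((max 1 (pvQ [] pole) * (pole.length - 1) : Nat) : Int), 2 * (pvInv pole : Int)] := by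
  unfold BubbleSortSteps_alt
  rw [pvScan_spec, pvI_nil_eq_inv]
  have h1 : max ((pole.length : Int) - 1) 0 = ((pole.length - 1 : Nat) : Int) := by omega
  rw [h1]
  simp only [List.cons.injEq, and_true]
  refine ⟨?_, ?_⟩
  · push_cast
    ring
  · push_cast
    ring

-- ===== VERDICT (by name: the statement is the Claim_ definition above) =====
theorem BubbleSortSteps_spec : Claim_equal_BubbleSortSteps := by
  intro pole _
  unfold Spec_BubbleSortSteps
  rw [A_formula, B_formula]
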